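-- pv_equiv track=rewrite | github.com/seoyoung671/algorithm | SWEA/D3/5207. ［파이썬 S／W 문제해결 구현］ 4일차 － 이진 탐색/［파이썬 S／W 문제해결 구현］ 4일차 － 이진 탐색.py | constrained_binary_search
-- ===== SOURCE A (Python) =====
-- def constrained_binary_search(a, x):
--     l, r = 0, len(a) - 1
--     last_dir = 0
--     while l <= r:
--         m = (l + r) // 2
--         if a[m] == x:
--             return True
--         elif x < a[m]:
--             if last_dir == -1:     # 직전에도 왼쪽으로 갔으면 실패
--                 return False
--             r = m - 1
--             last_dir = -1
--         else:  # x > a[m]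
--             if last_dir == 1:      # 직전에도 오른쪽으로 갔으면 실패
--                 return False
--             l = m + 1
--             last_dir = 1
--     return False
-- ===== SOURCE B (Python) =====
-- def constrained_binary_search(a, x):
--     # Same search, but the "last direction" flag is encoded in control flow:
--     # three small functions (first probe / just went left / just went right)
--     # recurse on the shrinking interval instead of mutating loop variables.
--     def after_left(l, r):       # previous step went left: going left again fails
--         if l > r:
--             return False
--         m = (l + r) // 2
--         if a[m] == x:
--             return True
--         if x < a[m]:
--             return False
--         return after_right(m + 1, r)
--
--     def after_right(l, r):      # previous step went right: going right again fails
--         if l > r: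
--             return False
--         m = (l + r) // 2
--         if a[m] == x:
--             return True
--         if x < a[m]:
--             return after_left(l, m - 1)
--         return False
--
--     def first(l, r):
--         if l > r:
--             return False
--         m = (l + r) // 2
--         if a[m] == x:
--             return True
--         if x < a[m]:
--             return after_left(l, m - 1)
--         return after_right(m + 1, r)
--
--     return first(0, len(a) - 1)
-- ===== Notes on version B (the rewrite author's own statement) =====
-- stated objective: alternative
-- what changed: The while loop mutating l, r and a last_dir flag is replaced by mutually recursive helpers first/after_left/after_right that encode the last direction in which function is running instead of a variable.
import Mathlib
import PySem

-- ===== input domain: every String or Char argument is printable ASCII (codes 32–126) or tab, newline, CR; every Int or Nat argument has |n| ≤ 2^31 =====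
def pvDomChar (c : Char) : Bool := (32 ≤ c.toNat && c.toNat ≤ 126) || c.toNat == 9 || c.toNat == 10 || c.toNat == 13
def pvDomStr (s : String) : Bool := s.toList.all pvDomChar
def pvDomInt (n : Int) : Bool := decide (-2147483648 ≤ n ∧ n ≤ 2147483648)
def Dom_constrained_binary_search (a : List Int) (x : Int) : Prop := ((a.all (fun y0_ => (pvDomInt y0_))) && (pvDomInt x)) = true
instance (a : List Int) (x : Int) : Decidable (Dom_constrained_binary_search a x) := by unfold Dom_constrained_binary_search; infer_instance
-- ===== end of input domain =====

-- B replaces A's while loop with a mutable last_dir flag by mutually recursive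
-- helpers that encode the last direction in control flow (objective: alternative).


-- ===== PORT A =====
-- A's while loop: state (l, r, last_dir) threaded through a tail recursion.
def csLoop (a : List Int) (x : Int) (l r last : Int) : Bool :=
  if _h : l ≤ r then
    let m := PySem.Int.floordiv (l + r) 2
    match PySem.List.pyGet? a m with
    | none => false   -- unreachable when called with 0 ≤ l ∧ r < a.length (Python never raises here)
    | some v =>
      if v == x then true
      else if x < v then
        if last == -1 then false
        else csLoop a x l (m - 1) (-1)
      else
        if last == 1 then false
        else csLoop a x (m + 1) r 1
  else false
termination_by (r - l + 1).toNat
decreasing_by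
  · have := PySem.Int.floordiv_two_mid_bounds _h
    omega
  · have := PySem.Int.floordiv_two_mid_bounds _h
    omega

def constrained_binary_search (a : List Int) (x : Int) : Bool :=
  csLoop a x 0 ((a.length : Int) - 1) 0

-- ===== PORT B =====
mutual
-- previous step went left: going left again fails
def csAfterL (a : List Int) (x : Int) (l r : Int) : Bool :=
  if _h : l > r then false
  else
    let m := PySem.Int.floordiv (l + r) 2
    match PySem.List.pyGet? a m with
    | none => false   -- unreachable when called with 0 ≤ l ∧ r < a.length
    | some v =>
      if v == x then true
      else if x < v then false
      else csAfterR a x (m + 1) r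
termination_by (r - l + 1).toNat
decreasing_by
  have := PySem.Int.floordiv_two_mid_bounds (show l ≤ r by omega)
  omega

-- previous step went right: going right again fails
def csAfterR (a : List Int) (x : Int) (l r : Int) : Bool :=
  if _h : l > r then false
  else
    let m := PySem.Int.floordiv (l + r) 2
    match PySem.List.pyGet? a m with
    | none => false   -- unreachable when called with 0 ≤ l ∧ r < a.length
    | some v =>
      if v == x then true
      else if x < v then csAfterL a x l (m - 1)
      else false
termination_by (r - l + 1).toNat
decreasing_by
  have := PySem.Int.floordiv_two_mid_bounds (show l ≤ r by omega)
  omega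
end

def csFirst (a : List Int) (x : Int) (l r : Int) : Bool :=
  if l > r then false
  else
    let m := PySem.Int.floordiv (l + r) 2
    match PySem.List.pyGet? a m with
    | none => false   -- unreachable when called with 0 ≤ l ∧ r < a.length
    | some v =>
      if v == x then true
      else if x < v then csAfterL a x l (m - 1)
      else csAfterR a x (m + 1) r

def constrained_binary_search_alt (a : List Int) (x : Int) : Bool :=
  csFirst a x 0 ((a.length : Int) - 1)

-- ===== PRECONDITION & SPEC =====
def Spec_constrained_binary_search (a : List Int) (x : Int) (out : Bool) : Prop := out = constrained_binary_search_alt a x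
instance (a : List Int) (x : Int) (out : Bool) : Decidable (Spec_constrained_binary_search a x out) := by unfold Spec_constrained_binary_search; infer_instance

-- ===== CLAIM (what is proved, stated in full; the proofs are below) =====
def Claim_equal_constrained_binary_search : Prop := ∀ (a : List Int) (x : Int), Dom_constrained_binary_search a x → Spec_constrained_binary_search a x (constrained_binary_search a x)

-- ===== LEMMAS AND PROOFS =====

-- csLoop with last = -1 / 1 is csAfterL / csAfterR; strong induction on the interval size.
theorem csLoop_dir (a : List Int) (x : Int) :
    ∀ n l r, (r - l + 1).toNat ≤ n →
      csLoop a x l r (-1) = csAfterL a x l r ∧ csLoop a x l r 1 = csAfterR a x l r := by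
  intro n
  induction n with
  | zero =>
    intro l r h
    have hlr : ¬ l ≤ r := by omega
    rw [csLoop, csLoop, csAfterL, csAfterR]
    simp [hlr, show l > r by omega]
  | succ n ih =>
    intro l r h
    by_cases hlr : l ≤ r
    · have hm := PySem.Int.floordiv_two_mid_bounds hlr
      rw [csLoop, csLoop, csAfterL, csAfterR]
      simp only [hlr, dif_pos, show ¬ l > r by omega, dif_neg, not_false_iff]
      constructor
      · cases hg : PySem.List.pyGet? a (PySem.Int.floordiv (l + r) 2) with
        | none => rfl
        | some v =>
          by_cases hv : v == x
          · simp [hv]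
          · by_cases hx : x < v
            · simp [hv, hx]
            · simp only [hv, if_false, hx, reduceCtorEq]
              have : ((-1 : Int) == 1) = false := by decide
              simp only [this]
              exact (ih (PySem.Int.floordiv (l + r) 2 + 1) r (by omega)).2
      · cases hg : PySem.List.pyGet? a (PySem.Int.floordiv (l + r) 2) with
        | none => rfl
        | some v =>
          by_cases hv : v == x
          · simp [hv]
          · by_cases hx : x < v
            · simp only [hv, hx, if_pos]
              have : ((1 : Int) == -1) = false := by decide
              simp only [this]
              exact (ih l (PySem.Int.floordiv (l + r) 2 - 1) (by omega)).1
            · simp [hv, hx]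
    · rw [csLoop, csLoop, csAfterL, csAfterR]
      simp [hlr, show l > r by omega]

theorem csLoop_zero (a : List Int) (x : Int) (l r : Int) :
    csLoop a x l r 0 = csFirst a x l r := by
  by_cases hlr : l ≤ r
  · have hm := PySem.Int.floordiv_two_mid_bounds hlr
    rw [csLoop, csFirst]
    simp only [hlr, dif_pos, show ¬ l > r by omega, if_neg, not_false_iff]
    cases hg : PySem.List.pyGet? a (PySem.Int.floordiv (l + r) 2) with
    | none => rfl
    | some v =>
      by_cases hv : v == x
      · simp [hv]
      · by_cases hx : x < v
        · simp only [hv, if_false, hx, if_pos, reduceCtorEq]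
          have : ((0 : Int) == -1) = false := by decide
          simp only [this]
          exact (csLoop_dir a x (r - l + 1).toNat l (PySem.Int.floordiv (l + r) 2 - 1) (by omega)).1
        · simp only [hv, if_false, hx, reduceCtorEq]
          have : ((0 : Int) == 1) = false := by decide
          simp only [this]
          exact (csLoop_dir a x (r - l + 1).toNat (PySem.Int.floordiv (l + r) 2 + 1) r (by omega)).2
  · rw [csLoop, csFirst]
    simp [hlr, show l > r by omega]

-- ===== VERDICT (by name: the statement is the Claim_ definition above) =====
theorem constrained_binary_search_spec : Claim_equal_constrained_binary_search := by
  intro a x _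
  unfold Spec_constrained_binary_search constrained_binary_search constrained_binary_search_alt
  exact csLoop_zero a x 0 ((a.length : Int) - 1)
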